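-- pv_equiv track=rewrite | github.com/Yang-Yolanda/my_nvit_master | nvit/Code_Paper2_Hybrid/exp1_probe.py | get_line_patches
-- ===== SOURCE A (Python) =====
-- def get_line_patches(start_idx, end_idx, grid_w, grid_h):
--     x0, y0 = start_idx % grid_w, start_idx // grid_w
--     x1, y1 = end_idx % grid_w, end_idx // grid_w
--     patches = []
--     dx, dy = abs(x1 - x0), abs(y1 - y0)
--     sx, sy = (1 if x0 < x1 else -1), (1 if y0 < y1 else -1)
--     err = dx - dy
--     while True:
--         if 0 <= x0 < grid_w and 0 <= y0 < grid_h: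
--             patches.append(y0 * grid_w + x0)
--         if x0 == x1 and y0 == y1: break
--         e2 = 2 * err
--         if e2 > -dy: err -= dy; x0 += sx
--         if e2 < dx: err += dx; y0 += sy
--     return patches
-- ===== SOURCE B (Python) =====
-- def get_line_patches(start_idx, end_idx, grid_w, grid_h):
--     x0, y0 = start_idx % grid_w, start_idx // grid_w
--     x1, y1 = end_idx % grid_w, end_idx // grid_w
--     dx, dy = abs(x1 - x0), abs(y1 - y0)
--     sx, sy = (1 if x0 < x1 else -1), (1 if y0 < y1 else -1)
--     patches = []
--
--     def emit(x, y):
--         if 0 <= x < grid_w and 0 <= y < grid_h: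
--             patches.append(y * grid_w + x)
--
--     err = dx - dy
--     x, y = x0, y0
--     if dx >= dy:
--         # shallow: drive x, one conditional y step per iteration
--         for _ in range(dx):
--             emit(x, y)
--             if 2 * err < dx:
--                 err += dx
--                 y += sy
--             err -= dy
--             x += sx
--     else:
--         # steep: drive y, one conditional x step per iteration
--         for _ in range(dy):
--             emit(x, y)
--             if 2 * err > -dy:
--                 err -= dy
--                 x += sx
--             err += dx
--             y += sy
--     emit(x, y)
--     return patches
-- ===== Notes on version B (the rewrite author's own statement) =====
-- stated objective: alternative
-- what changed: replaces A's single symmetric while-True Bresenham loop (termination test inside, two independent step conditionals per iteration) by a major-axis-driven form: branch on dx>=dy and run a counted for-loop over the major axis that steps the major coordinate unconditionally and the minor one via the error accumulator, emitting the endpoint after the loop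
import Mathlib
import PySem

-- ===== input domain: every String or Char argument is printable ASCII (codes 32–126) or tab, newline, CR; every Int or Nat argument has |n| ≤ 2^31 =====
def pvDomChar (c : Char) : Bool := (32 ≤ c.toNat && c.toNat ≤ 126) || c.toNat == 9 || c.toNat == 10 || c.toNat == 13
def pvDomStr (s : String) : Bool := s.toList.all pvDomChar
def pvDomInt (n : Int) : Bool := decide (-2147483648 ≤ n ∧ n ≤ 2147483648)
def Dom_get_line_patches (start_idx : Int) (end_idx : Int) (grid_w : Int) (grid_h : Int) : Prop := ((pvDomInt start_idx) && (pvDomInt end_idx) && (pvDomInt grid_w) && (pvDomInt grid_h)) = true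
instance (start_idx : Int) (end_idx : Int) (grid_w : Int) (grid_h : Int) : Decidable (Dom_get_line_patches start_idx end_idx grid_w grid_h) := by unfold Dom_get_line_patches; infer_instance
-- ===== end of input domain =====

-- B changes the decomposition: A's single symmetric while-True Bresenham loop becomes a
-- major-axis branch (dx >= dy vs dx < dy) with a counted for-loop driving the major axis
-- (objective: alternative, same asymptotic cost).

-- ===== PORT A =====
-- shared emit helper: 'if 0 <= x < grid_w and 0 <= y < grid_h: patches.append(y*grid_w+x)'
def pvEmit (grid_w grid_h x y : Int) (acc : List Int) : List Int :=
  if 0 ≤ x ∧ x < grid_w ∧ 0 ≤ y ∧ y < grid_h then acc ++ [y * grid_w + x] else acc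

-- A's 'while True' loop; the fuel argument only makes it total (dx+dy+1 iterations always
-- suffice for the Python loop, which terminates after max(dx,dy) steps).
def pvLoopA (grid_w grid_h x1 y1 dx dy sx sy : Int) : Nat → Int → Int → Int → List Int → List Int
  | 0, _, _, _, acc => acc
  | fuel+1, x0, y0, err, acc =>
    let acc' := pvEmit grid_w grid_h x0 y0 acc
    if x0 = x1 ∧ y0 = y1 then acc'
    else
      let e2 := 2 * err
      let err1 := if e2 > -dy then err - dy else err
      let x0' := if e2 > -dy then x0 + sx else x0
      let err2 := if e2 < dx then err1 + dx else err1
      let y0' := if e2 < dx then y0 + sy else y0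
      pvLoopA grid_w grid_h x1 y1 dx dy sx sy fuel x0' y0' err2 acc'

def get_line_patches (start_idx : Int) (end_idx : Int) (grid_w : Int) (grid_h : Int) : List Int :=
  let x0 := PySem.Int.mod start_idx grid_w
  let y0 := PySem.Int.floordiv start_idx grid_w
  let x1 := PySem.Int.mod end_idx grid_w
  let y1 := PySem.Int.floordiv end_idx grid_w
  let dx := |x1 - x0|
  let dy := |y1 - y0|
  let sx := if x0 < x1 then (1 : Int) else -1
  let sy := if y0 < y1 then (1 : Int) else -1
  pvLoopA grid_w grid_h x1 y1 dx dy sx sy ((dx + dy).toNat + 1) x0 y0 (dx - dy) []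

-- ===== PORT B =====
-- shallow branch: 'for _ in range(dx): emit; if 2*err < dx: err += dx; y += sy; err -= dy; x += sx'
-- followed by the final 'emit(x, y)' (the k = 0 case).
def pvLoopShallow (grid_w grid_h dx dy sx sy : Int) : Nat → Int → Int → Int → List Int → List Int
  | 0, x, y, _, acc => pvEmit grid_w grid_h x y acc
  | k+1, x, y, err, acc =>
    let acc' := pvEmit grid_w grid_h x y acc
    let err1 := if 2 * err < dx then err + dx else err
    let y' := if 2 * err < dx then y + sy else y
    pvLoopShallow grid_w grid_h dx dy sx sy k (x + sx) y' (err1 - dy) acc'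

-- steep branch: 'for _ in range(dy): emit; if 2*err > -dy: err -= dy; x += sx; err += dx; y += sy'
def pvLoopSteep (grid_w grid_h dx dy sx sy : Int) : Nat → Int → Int → Int → List Int → List Int
  | 0, x, y, _, acc => pvEmit grid_w grid_h x y acc
  | k+1, x, y, err, acc =>
    let acc' := pvEmit grid_w grid_h x y acc
    let err1 := if 2 * err > -dy then err - dy else err
    let x' := if 2 * err > -dy then x + sx else x
    pvLoopSteep grid_w grid_h dx dy sx sy k x' (y + sy) (err1 + dx) acc'

def get_line_patches_alt (start_idx : Int) (end_idx : Int) (grid_w : Int) (grid_h : Int) : List Int :=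
  let x0 := PySem.Int.mod start_idx grid_w
  let y0 := PySem.Int.floordiv start_idx grid_w
  let x1 := PySem.Int.mod end_idx grid_w
  let y1 := PySem.Int.floordiv end_idx grid_w
  let dx := |x1 - x0|
  let dy := |y1 - y0|
  let sx := if x0 < x1 then (1 : Int) else -1
  let sy := if y0 < y1 then (1 : Int) else -1
  if dx ≥ dy then pvLoopShallow grid_w grid_h dx dy sx sy dx.toNat x0 y0 (dx - dy) []
  else pvLoopSteep grid_w grid_h dx dy sx sy dy.toNat x0 y0 (dx - dy) []

-- ===== PRECONDITION & SPEC =====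
-- Python raises ZeroDivisionError on 'start_idx % grid_w' when grid_w = 0; that is all Pre_ excludes.
def Pre_get_line_patches (start_idx : Int) (end_idx : Int) (grid_w : Int) (grid_h : Int) : Prop := grid_w ≠ 0
instance (start_idx : Int) (end_idx : Int) (grid_w : Int) (grid_h : Int) : Decidable (Pre_get_line_patches start_idx end_idx grid_w grid_h) := by unfold Pre_get_line_patches; infer_instance

def pvWitness_get_line_patches : Int × Int × Int × Int := (0, 5, 3, 3)

def Spec_get_line_patches (start_idx : Int) (end_idx : Int) (grid_w : Int) (grid_h : Int) (out : List Int) : Prop := out = get_line_patches_alt start_idx end_idx grid_w grid_h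
instance (start_idx : Int) (end_idx : Int) (grid_w : Int) (grid_h : Int) (out : List Int) : Decidable (Spec_get_line_patches start_idx end_idx grid_w grid_h out) := by unfold Spec_get_line_patches; infer_instance

-- ===== CLAIM (what is proved, stated in full; the proofs are below) =====
def Claim_equal_get_line_patches : Prop := ∀ (start_idx : Int) (end_idx : Int) (grid_w : Int) (grid_h : Int), Dom_get_line_patches start_idx end_idx grid_w grid_h → Pre_get_line_patches start_idx end_idx grid_w grid_h → Spec_get_line_patches start_idx end_idx grid_w grid_h (get_line_patches start_idx end_idx grid_w grid_h)

-- ===== LEMMAS AND PROOFS =====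

-- Shallow case (dy ≤ dx): A's loop, started at a state reachable after (dx - r) iterations,
-- equals B's counted shallow loop with r iterations left.  t is the remaining |y1 - y|,
-- and the error invariant dx - 2dy ≤ 2err ≤ 3dx - 2dy (plus err = 0 when dx = dy) shows
-- that A's x-step condition always fires and that A breaks exactly when r = 0.
theorem pv_shallow_eq (grid_w grid_h dx dy sx sy : Int)
    (hsx : sx = 1 ∨ sx = -1) (hsy : sy = 1 ∨ sy = -1)
    (hdy : 0 ≤ dy) (hdd : dy ≤ dx) :
    ∀ (r fuel : Nat) (x y err t : Int) (acc : List Int),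
      r + 1 ≤ fuel → (r : Int) ≤ dx → 0 ≤ t → t ≤ dy →
      err = dx - dy - t * dx + (r : Int) * dy →
      dx - 2 * dy ≤ 2 * err → 2 * err ≤ 3 * dx - 2 * dy →
      (dx = dy → err = 0) →
      pvLoopA grid_w grid_h (x + sx * (r : Int)) (y + sy * t) dx dy sx sy fuel x y err acc
        = pvLoopShallow grid_w grid_h dx dy sx sy r x y err acc := by
  intro r
  induction r with
  | zero =>
    intro fuel x y err t acc hfuel hr ht0 htdy herr hlo hhi hpar
    obtain ⟨f, rfl⟩ : ∃ f, fuel = f + 1 := ⟨fuel - 1, by omega⟩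
    push_cast at herr
    have ht : t = 0 := by
      rcases eq_or_lt_of_le (le_trans hdy hdd) with h0 | h0
      · omega
      · by_contra hne
        have h1 : 1 ≤ t := by omega
        have h2 : dx ≤ t * dx := le_mul_of_one_le_left (le_of_lt h0) h1
        linarith
    subst ht
    simp [pvLoopA, pvLoopShallow]
  | succ r ih =>
    intro fuel x y err t acc hfuel hr ht0 htdy herr hlo hhi hpar
    obtain ⟨f, rfl⟩ : ∃ f, fuel = f + 1 := ⟨fuel - 1, by omega⟩
    push_cast at herr hr ⊢
    have hr0 : (0 : Int) ≤ (r : Int) := by exact_mod_cast Nat.zero_le r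
    have hrdy : 0 ≤ (r : Int) * dy := mul_nonneg hr0 hdy
    have hdx0 : 0 < dx := by omega
    have hnd : ¬ (x = x + sx * ((r : Int) + 1) ∧ y = y + sy * t) := by
      rintro ⟨h1, -⟩
      rcases hsx with h | h <;> subst h <;> omega
    have hxstep : -dy < 2 * err := by
      rcases eq_or_lt_of_le hdd with hde | hde
      · have := hpar hde.symm; omega
      · omega
    simp only [pvLoopA, pvLoopShallow, gt_iff_lt]
    rw [if_neg hnd]
    by_cases hY : 2 * err < dx
    · -- y steps too; t must be ≥ 1
      have ht1 : 1 ≤ t := by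
        by_contra hc
        have ht : t = 0 := by omega
        subst ht
        nlinarith
      simp only [if_pos hxstep, if_pos hY]
      have e1 : x + sx * ((r : Int) + 1) = (x + sx) + sx * (r : Int) := by ring
      have e2 : y + sy * t = (y + sy) + sy * (t - 1) := by ring
      have e3 : err - dy + dx = (err + dx) - dy := by ring
      rw [e1, e2, e3]
      exact ih f (x + sx) (y + sy) ((err + dx) - dy) (t - 1) _
        (by omega) (by omega) (by omega) (by omega)
        (by linear_combination herr) (by omega) (by omega)
        (by intro h; have := hpar h; omega)
    · -- no y step (impossible to have dx = dy here)
      simp only [if_pos hxstep, if_neg hY]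
      have e1 : x + sx * ((r : Int) + 1) = (x + sx) + sx * (r : Int) := by ring
      rw [e1]
      exact ih f (x + sx) y (err - dy) t _
        (by omega) (by omega) ht0 htdy
        (by linear_combination herr) (by omega) (by omega)
        (by intro h; have := hpar h; omega)

-- Steep case (dx < dy): symmetric, with remaining |x1 - x| = u and invariant
-- 2dx - 3dy ≤ 2err ≤ 2dx - dy, which shows A's y-step condition always fires.
theorem pv_steep_eq (grid_w grid_h dx dy sx sy : Int)
    (hsx : sx = 1 ∨ sx = -1) (hsy : sy = 1 ∨ sy = -1)
    (hdx : 0 ≤ dx) (hdd : dx < dy) :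
    ∀ (r fuel : Nat) (x y err u : Int) (acc : List Int),
      r + 1 ≤ fuel → (r : Int) ≤ dy → 0 ≤ u → u ≤ dx →
      err = dx - dy + u * dy - (r : Int) * dx →
      2 * dx - 3 * dy ≤ 2 * err → 2 * err ≤ 2 * dx - dy →
      pvLoopA grid_w grid_h (x + sx * u) (y + sy * (r : Int)) dx dy sx sy fuel x y err acc
        = pvLoopSteep grid_w grid_h dx dy sx sy r x y err acc := by
  intro r
  induction r with
  | zero =>
    intro fuel x y err u acc hfuel hr hu0 hudx herr hlo hhi
    obtain ⟨f, rfl⟩ : ∃ f, fuel = f + 1 := ⟨fuel - 1, by omega⟩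
    push_cast at herr
    have hdy0 : 0 < dy := by omega
    have hu : u = 0 := by
      by_contra hne
      have h1 : 1 ≤ u := by omega
      have h2 : dy ≤ u * dy := le_mul_of_one_le_left (le_of_lt hdy0) h1
      linarith
    subst hu
    simp [pvLoopA, pvLoopSteep]
  | succ r ih =>
    intro fuel x y err u acc hfuel hr hu0 hudx herr hlo hhi
    obtain ⟨f, rfl⟩ : ∃ f, fuel = f + 1 := ⟨fuel - 1, by omega⟩
    push_cast at herr hr ⊢
    have hr0 : (0 : Int) ≤ (r : Int) := by exact_mod_cast Nat.zero_le r
    have hrdx : 0 ≤ (r : Int) * dx := mul_nonneg hr0 hdx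
    have hdy0 : 0 < dy := by omega
    have hnd : ¬ (x = x + sx * u ∧ y = y + sy * ((r : Int) + 1)) := by
      rintro ⟨-, h1⟩
      rcases hsy with h | h <;> subst h <;> omega
    have hystep : 2 * err < dx := by omega
    simp only [pvLoopA, pvLoopSteep, gt_iff_lt]
    rw [if_neg hnd]
    by_cases hX : -dy < 2 * err
    · -- x steps too; u must be ≥ 1
      have hu1 : 1 ≤ u := by
        by_contra hc
        have hu : u = 0 := by omega
        subst hu
        nlinarith
      simp only [if_pos hX, if_pos hystep]
      have e1 : x + sx * u = (x + sx) + sx * (u - 1) := by ring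
      have e2 : y + sy * ((r : Int) + 1) = (y + sy) + sy * (r : Int) := by ring
      rw [e1, e2]
      exact ih f (x + sx) (y + sy) (err - dy + dx) (u - 1) _
        (by omega) (by omega) (by omega) (by omega)
        (by linear_combination herr) (by omega) (by omega)
    · -- no x step
      simp only [if_neg hX, if_pos hystep]
      have e2 : y + sy * ((r : Int) + 1) = (y + sy) + sy * (r : Int) := by ring
      rw [e2]
      exact ih f x (y + sy) (err + dx) u _
        (by omega) (by omega) hu0 hudx
        (by linear_combination herr) (by omega) (by omega)

-- the two ports agree for arbitrary endpoints (the common prelude made explicit)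
theorem pv_main (grid_w grid_h x0 y0 x1 y1 : Int) :
    pvLoopA grid_w grid_h x1 y1 (|x1 - x0|) (|y1 - y0|)
        (if x0 < x1 then (1 : Int) else -1) (if y0 < y1 then (1 : Int) else -1)
        ((|x1 - x0| + |y1 - y0|).toNat + 1) x0 y0 (|x1 - x0| - |y1 - y0|) []
      = if |x1 - x0| ≥ |y1 - y0| then
          pvLoopShallow grid_w grid_h (|x1 - x0|) (|y1 - y0|)
            (if x0 < x1 then (1 : Int) else -1) (if y0 < y1 then (1 : Int) else -1)
            (|x1 - x0|).toNat x0 y0 (|x1 - x0| - |y1 - y0|) []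
        else
          pvLoopSteep grid_w grid_h (|x1 - x0|) (|y1 - y0|)
            (if x0 < x1 then (1 : Int) else -1) (if y0 < y1 then (1 : Int) else -1)
            (|y1 - y0|).toNat x0 y0 (|x1 - x0| - |y1 - y0|) [] := by
  set dx := |x1 - x0| with hdx
  set dy := |y1 - y0| with hdy
  set sx := if x0 < x1 then (1 : Int) else -1 with hsxd
  set sy := if y0 < y1 then (1 : Int) else -1 with hsyd
  have hdx0 : 0 ≤ dx := abs_nonneg _
  have hdy0 : 0 ≤ dy := abs_nonneg _
  have hsx : sx = 1 ∨ sx = -1 := by rw [hsxd]; split <;> simp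
  have hsy : sy = 1 ∨ sy = -1 := by rw [hsyd]; split <;> simp
  have hX1 : x1 = x0 + sx * dx := by
    rw [hsxd, hdx]; split_ifs with h
    · rw [abs_of_pos (by omega)]; ring
    · rw [abs_of_nonpos (by omega)]; ring
  have hY1 : y1 = y0 + sy * dy := by
    rw [hsyd, hdy]; split_ifs with h
    · rw [abs_of_pos (by omega)]; ring
    · rw [abs_of_nonpos (by omega)]; ring
  by_cases hsh : dx ≥ dy
  · rw [if_pos hsh]
    have hcast : ((dx.toNat : Int)) = dx := Int.toNat_of_nonneg hdx0
    have hx1' : x1 = x0 + sx * ((dx.toNat : Int)) := by rw [hcast]; exact hX1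
    rw [hx1', hY1]
    exact pv_shallow_eq grid_w grid_h dx dy sx sy hsx hsy hdy0 hsh
      dx.toNat ((dx + dy).toNat + 1) x0 y0 (dx - dy) dy []
      (by omega) (by omega) hdy0 le_rfl (by rw [hcast]; ring) (by omega) (by omega) (by omega)
  · rw [if_neg hsh]
    have hcast : ((dy.toNat : Int)) = dy := Int.toNat_of_nonneg hdy0
    have hy1' : y1 = y0 + sy * ((dy.toNat : Int)) := by rw [hcast]; exact hY1
    rw [hX1, hy1']
    exact pv_steep_eq grid_w grid_h dx dy sx sy hsx hsy hdx0 (by omega)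
      dy.toNat ((dx + dy).toNat + 1) x0 y0 (dx - dy) dx []
      (by omega) (by omega) hdx0 le_rfl (by rw [hcast]; ring) (by omega) (by omega)

-- ===== VERDICT (by name: the statement is the Claim_ definition above) =====
theorem get_line_patches_spec : Claim_equal_get_line_patches := by
  intro start_idx end_idx grid_w grid_h _ _
  exact pv_main grid_w grid_h (PySem.Int.mod start_idx grid_w) (PySem.Int.floordiv start_idx grid_w)
    (PySem.Int.mod end_idx grid_w) (PySem.Int.floordiv end_idx grid_w)
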